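-- pv_equiv track=rewrite | github.com/hamedsey/RC_Masstree | scripts/collect_latency_2.py | count_remaps
-- ===== SOURCE A (Python) =====
-- def count_remaps(connection_list):
--     # Dictionary to store the current core of each connection
--     connection_to_core = {}
--     # Counter for remappings
--     remap_count = 0
--
--     # Iterate through each connection, core pair in the list
--     for connection, core in connection_list:
--         # Check if the connection exists and is mapped to a different core
--         if connection in connection_to_core:
--             if connection_to_core[connection] != core:
--                 remap_count += 1
--                 # Update the core for this connection
--                 connection_to_core[connection] = core
--         else:
--             # New connection, add to dictionary
--             connection_to_core[connection] = core
--
--     return remap_count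
-- ===== SOURCE B (Python) =====
-- def count_remaps(connection_list):
--     # Group phase: ordered list of cores each connection was assigned, in order.
--     groups = {}
--     for conn, core in connection_list:
--         groups.setdefault(conn, []).append(core)
--     # Count phase: transitions within each connection's core sequence.
--     total = 0
--     for cores in groups.values():
--         total += sum(1 for a, b in zip(cores, cores[1:]) if a != b)
--     return total
-- ===== Notes on version B (the rewrite author's own statement) =====
-- stated objective: alternative
-- what changed: Replaced the streaming compare-to-last-core loop with a two-phase group-then-count: first build a dict mapping each connection to its ordered core list, then sum the adjacent-pair transitions within each group.
import Mathlib
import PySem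

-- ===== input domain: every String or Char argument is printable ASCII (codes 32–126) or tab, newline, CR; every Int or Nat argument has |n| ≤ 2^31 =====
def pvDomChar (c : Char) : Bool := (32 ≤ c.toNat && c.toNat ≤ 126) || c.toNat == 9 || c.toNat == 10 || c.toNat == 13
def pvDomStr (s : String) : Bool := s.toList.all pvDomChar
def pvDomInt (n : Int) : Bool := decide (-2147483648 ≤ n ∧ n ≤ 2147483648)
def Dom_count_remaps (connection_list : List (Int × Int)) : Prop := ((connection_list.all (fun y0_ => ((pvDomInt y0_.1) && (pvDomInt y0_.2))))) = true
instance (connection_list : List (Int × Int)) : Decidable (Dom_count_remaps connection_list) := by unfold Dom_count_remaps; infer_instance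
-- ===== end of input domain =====

-- B replaces A's streaming compare-to-last loop by a group-then-count-transitions pass (alternative decomposition, same cost).

-- ===== PORT A =====
def count_remaps (connection_list : List (Int × Int)) : Int :=
  (connection_list.foldl
    (fun (st : PySem.Dict Int Int × Int) (p : Int × Int) =>
      if st.1.contains p.1 then
        if st.1.getD p.1 0 ≠ p.2 then (st.1.insert p.1 p.2, st.2 + 1) else st
      else (st.1.insert p.1 p.2, st.2))
    (PySem.Dict.empty, 0)).2

-- ===== PORT B =====
def count_remaps_alt (connection_list : List (Int × Int)) : Int :=
  let groups : PySem.Dict Int (List Int) :=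
    connection_list.foldl (fun d p => d.modify p.1 [] (· ++ [p.2])) PySem.Dict.empty
  groups.values.foldl
    (fun acc cores =>
      acc + ((cores.zip (PySem.List.slice cores (some 1) none)).map
              (fun q => if q.1 ≠ q.2 then (1 : Int) else 0)).sum) 0

-- ===== PRECONDITION & SPEC =====
def Spec_count_remaps (connection_list : List (Int × Int)) (out : Int) : Prop := out = count_remaps_alt connection_list
instance (connection_list : List (Int × Int)) (out : Int) : Decidable (Spec_count_remaps connection_list out) := by unfold Spec_count_remaps; infer_instance

-- ===== CLAIM (what is proved, stated in full; the proofs are below) =====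
def Claim_equal_count_remaps : Prop := ∀ (connection_list : List (Int × Int)), Dom_count_remaps connection_list → Spec_count_remaps connection_list (count_remaps connection_list)

-- ===== LEMMAS AND PROOFS =====

/-- Transition count of a core sequence (B's inner sum, with `cores[1:]` as `drop 1`). -/
def pvTrans (xs : List Int) : Int :=
  ((xs.zip (xs.drop 1)).map (fun q => if q.1 ≠ q.2 then (1 : Int) else 0)).sum

/-- The ordered list of cores assigned to connection `c` in `l`. -/
def pvCores (c : Int) (l : List (Int × Int)) : List Int :=
  (l.filter (fun p => p.1 == c)).map (·.2)

lemma pvCores_append (c a v : Int) (l : List (Int × Int)) :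
    pvCores c (l ++ [(a, v)]) = pvCores c l ++ (if a == c then [v] else []) := by
  simp only [pvCores, List.filter_append, List.map_append]
  by_cases h : a = c <;> simp [h]

lemma pvTrans_append (xs : List Int) (v : Int) :
    pvTrans (xs ++ [v]) =
      pvTrans xs + (match xs.getLast? with
                    | none => 0
                    | some a => if a ≠ v then 1 else 0) := by
  induction xs with
  | nil => simp [pvTrans]
  | cons x xs ih =>
    cases xs with
    | nil => simp [pvTrans]
    | cons y t =>
      have hx : pvTrans (x :: y :: t) = (if x ≠ y then (1:Int) else 0) + pvTrans (y :: t) := by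
        simp [pvTrans]
      have hx2 : pvTrans (x :: y :: (t ++ [v])) =
          (if x ≠ y then (1:Int) else 0) + pvTrans (y :: (t ++ [v])) := by
        simp [pvTrans]
      have : ((x :: y :: t) ++ [v]) = x :: y :: (t ++ [v]) := by simp
      rw [this, hx2]
      have ih' := ih
      simp only [List.cons_append] at ih'
      rw [ih', hx]
      simp [List.getLast?_cons_cons]
      ring

lemma pvMem_fst_iff_cores_ne (c : Int) (l : List (Int × Int)) :
    c ∈ l.map (·.1) ↔ pvCores c l ≠ [] := by
  simp only [pvCores, ne_eq, List.map_eq_nil_iff, List.filter_eq_nil_iff, List.mem_map,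
    not_forall]
  constructor
  · rintro ⟨p, hp, rfl⟩
    exact ⟨p, hp, by simp⟩
  · rintro ⟨p, hp, h⟩
    exact ⟨p, hp, by simpa using h⟩

/-- Summing a pointwise-updated function over a Nodup list: only the term at `a` changes. -/
lemma pvSum_update (ks : List Int) (f g : Int → Int) (a : Int) (δ : Int)
    (hnd : ks.Nodup) (hne : ∀ c ∈ ks, c ≠ a → g c = f c) (ha : g a = f a + δ) :
    (ks.map g).sum = (ks.map f).sum + (if a ∈ ks then δ else 0) := by
  induction ks with
  | nil => simp
  | cons k ks ih =>
    simp only [List.nodup_cons] at hnd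
    have ih' := ih hnd.2 (fun c hc => hne c (List.mem_cons_of_mem _ hc))
    by_cases hk : k = a
    · subst hk
      have hall : ∀ c ∈ ks, g c = f c := by
        intro c hc
        exact hne c (List.mem_cons_of_mem _ hc) (fun h => hnd.1 (h ▸ hc))
      rw [if_pos List.mem_cons_self]
      simp only [List.map_cons, List.sum_cons, ha, List.map_congr_left hall]
      ring
    · have hgk : g k = f k := hne k List.mem_cons_self hk
      simp only [List.map_cons, List.sum_cons, hgk, ih', List.mem_cons]
      have hiff : (a = k ∨ a ∈ ks) ↔ a ∈ ks := by
        constructor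
        · rintro (h | h)
          · exact absurd h.symm hk
          · exact h
        · exact Or.inr
      rw [if_congr hiff rfl rfl]; ring

/-- Invariant of A's fold: the dict maps each connection to the last core of its group, and the
    counter is the total number of transitions across groups. -/
lemma pvA_inv (l : List (Int × Int)) :
    (∀ c, ((l.foldl
        (fun (st : PySem.Dict Int Int × Int) (p : Int × Int) =>
          if st.1.contains p.1 then
            if st.1.getD p.1 0 ≠ p.2 then (st.1.insert p.1 p.2, st.2 + 1) else st
          else (st.1.insert p.1 p.2, st.2))
        (PySem.Dict.empty, 0)).1).get? c = (pvCores c l).getLast?) ∧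
      (l.foldl
        (fun (st : PySem.Dict Int Int × Int) (p : Int × Int) =>
          if st.1.contains p.1 then
            if st.1.getD p.1 0 ≠ p.2 then (st.1.insert p.1 p.2, st.2 + 1) else st
          else (st.1.insert p.1 p.2, st.2))
        (PySem.Dict.empty, 0)).2 =
      ((PySem.Set.ofList (l.map (·.1))).map (fun c => pvTrans (pvCores c l))).sum := by
  induction l using List.reverseRecOn with
  | nil => constructor <;> simp [pvCores, PySem.Dict.get?_empty, PySem.Set.ofList_nil]
  | append_singleton l p ih =>
    obtain ⟨a, v⟩ := p
    obtain ⟨ihd, ihc⟩ := ih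
    rw [List.foldl_append] at *
    set st := (l.foldl
        (fun (st : PySem.Dict Int Int × Int) (p : Int × Int) =>
          if st.1.contains p.1 then
            if st.1.getD p.1 0 ≠ p.2 then (st.1.insert p.1 p.2, st.2 + 1) else st
          else (st.1.insert p.1 p.2, st.2))
        (PySem.Dict.empty, 0)) with hst
    have hcontains : st.1.contains a = ((pvCores a l).getLast?).isSome := by
      rw [PySem.Dict.contains_eq_isSome_get?, ihd]
    have hkeys : (l ++ [(a, v)]).map (·.1) = l.map (·.1) ++ [a] := by simp
    have hnd : (PySem.Set.ofList (l.map (·.1))).Nodup := PySem.Set.nodup_ofList _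
    by_cases hc : pvCores a l = []
    · -- fresh connection
      have hmem : a ∉ l.map (·.1) := by
        rw [pvMem_fst_iff_cores_ne]; simp [hc]
      have hcf : st.1.contains a = false := by rw [hcontains, hc]; rfl
      simp only [List.foldl_cons, List.foldl_nil, hcf, Bool.false_eq_true, if_false]
      constructor
      · intro c
        by_cases hca : c = a
        · subst hca
          rw [PySem.Dict.get?_insert_self, pvCores_append]
          simp [hc]
        · rw [PySem.Dict.get?_insert_of_ne _ _ hca, ihd, pvCores_append]
          have : (a == c) = false := by simpa using (Ne.symm hca)
          simp [this]
      · rw [ihc, hkeys, PySem.Set.ofList_append_singleton,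
          PySem.Set.add_of_not_mem (by simpa [PySem.Set.mem_ofList] using hmem)]
        rw [List.map_append, List.sum_append]
        have h1 : ((PySem.Set.ofList (l.map (·.1))).map
            (fun c => pvTrans (pvCores c (l ++ [(a, v)])))).sum
            = ((PySem.Set.ofList (l.map (·.1))).map (fun c => pvTrans (pvCores c l))).sum := by
          apply congrArg
          apply List.map_congr_left
          intro c hcm
          have hca : c ≠ a := by
            intro h
            subst h
            exact hmem (by simpa [PySem.Set.mem_ofList] using hcm)
          rw [pvCores_append]
          have : (a == c) = false := by simpa using (Ne.symm hca)
          simp [this]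
        rw [h1]
        have h2 : pvTrans (pvCores a (l ++ [(a, v)])) = 0 := by
          rw [pvCores_append, hc]; simp [pvTrans]
        simp [h2]
    · -- existing connection
      have hmem : a ∈ l.map (·.1) := (pvMem_fst_iff_cores_ne a l).mpr hc
      have hsome : (pvCores a l).getLast? = some ((pvCores a l).getLast hc) :=
        List.getLast?_eq_some_getLast hc
      have hct : st.1.contains a = true := by rw [hcontains, hsome]; rfl
      have hgetD : st.1.getD a 0 = (pvCores a l).getLast hc := by
        rw [PySem.Dict.getD_eq_get?_getD, ihd, hsome]; rfl
      have hkeyset : PySem.Set.ofList ((l ++ [(a, v)]).map (·.1)) =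
          PySem.Set.ofList (l.map (·.1)) := by
        rw [hkeys, PySem.Set.ofList_append_singleton,
          PySem.Set.add_of_mem (by simpa [PySem.Set.mem_ofList] using hmem)]
      have hδ : ∀ c, c ≠ a → pvCores c (l ++ [(a, v)]) = pvCores c l := by
        intro c hca
        rw [pvCores_append]
        have : (a == c) = false := by simpa using (Ne.symm hca)
        simp [this]
      have htrans_a : pvTrans (pvCores a (l ++ [(a, v)])) =
          pvTrans (pvCores a l) + (if (pvCores a l).getLast hc ≠ v then 1 else 0) := by
        rw [pvCores_append]
        simp only [beq_self_eq_true, if_true]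
        rw [pvTrans_append, hsome]
      have hsum : ∀ δ, (pvTrans (pvCores a (l ++ [(a, v)])) = pvTrans (pvCores a l) + δ) →
          ((PySem.Set.ofList ((l ++ [(a, v)]).map (·.1))).map
            (fun c => pvTrans (pvCores c (l ++ [(a, v)])))).sum
          = ((PySem.Set.ofList (l.map (·.1))).map (fun c => pvTrans (pvCores c l))).sum + δ := by
        intro δ hδa
        rw [hkeyset]
        have := pvSum_update (PySem.Set.ofList (l.map (·.1)))
          (fun c => pvTrans (pvCores c l)) (fun c => pvTrans (pvCores c (l ++ [(a, v)])))
          a δ hnd (fun c _ hca => congrArg pvTrans (hδ c hca)) hδa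
        rw [this, if_pos (by simpa [PySem.Set.mem_ofList] using hmem)]
      simp only [List.foldl_cons, List.foldl_nil, hct, if_true, hgetD]
      by_cases hv : (pvCores a l).getLast hc ≠ v
      · rw [if_pos hv]
        constructor
        · intro c
          by_cases hca : c = a
          · subst hca
            rw [PySem.Dict.get?_insert_self, pvCores_append]
            simp
          · rw [PySem.Dict.get?_insert_of_ne _ _ hca, ihd, hδ c hca]
        · rw [ihc] at *
          rw [hsum 1 (by rw [htrans_a, if_pos hv])]
      · rw [if_neg hv]
        constructor
        · intro c
          by_cases hca : c = a
          · subst hca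
            rw [ihd, pvCores_append]
            rw [not_ne_iff] at hv
            simp [← hv, hsome]
          · rw [ihd, hδ c hca]
        · rw [ihc, hsum 0 (by rw [htrans_a, if_neg hv])]
          simp

/-- B computes the same sum of per-connection transition counts. -/
lemma pvB_eq (l : List (Int × Int)) :
    count_remaps_alt l =
      ((PySem.Set.ofList (l.map (·.1))).map (fun c => pvTrans (pvCores c l))).sum := by
  unfold count_remaps_alt
  dsimp only []
  set groups := l.foldl (fun d (p : Int × Int) => d.modify p.1 [] (· ++ [p.2]))
    (PySem.Dict.empty : PySem.Dict Int (List Int)) with hg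
  have hkeys : groups.keys = PySem.Set.ofList (l.map (·.1)) := by
    rw [hg, PySem.Dict.keys_foldl_modify_key]
    simp [PySem.Set.update_nil_left]
  have hnd : groups.keys.Nodup := by rw [hkeys]; exact PySem.Set.nodup_ofList _
  have hgetD : ∀ c, groups.getD c [] = pvCores c l := by
    intro c
    rw [hg, PySem.Dict.getD_foldl_modify_append]
    simp [pvCores, PySem.Dict.getD_empty]
  have hvals : groups.values = groups.keys.map (fun k => groups.getD k []) :=
    PySem.Dict.values_eq_map_keys groups hnd []
  rw [hvals, hkeys]
  rw [PySem.List.foldl_add]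
  rw [zero_add, List.map_map]
  congr 1
  apply List.map_congr_left
  intro c _
  simp only [Function.comp, hgetD, pvTrans]
  rw [PySem.List.slice_from _ (by norm_num : (0:Int) ≤ 1)]
  norm_num

-- ===== VERDICT (by name: the statement is the Claim_ definition above) =====
theorem count_remaps_spec : Claim_equal_count_remaps := by
  intro l _
  unfold Spec_count_remaps count_remaps
  rw [pvB_eq, (pvA_inv l).2]
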